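-- pv_equiv track=rewrite | github.com/jlarger/DiseaseProjectKane | graphTesting2.py | whatColor
-- ===== SOURCE A (Python) =====
-- def whatColor(numberBeingTested):
--     if numberBeingTested == 37 or numberBeingTested == 0:
--         return "green"
--     listOfRedNums = [1,3,5,7,9,12,14,16,18,19,21,23,25,27,28,30,32,34,36]
--     for numberInListRed in listOfRedNums:
--         if numberBeingTested == numberInListRed:
--             return "red"
--     listOfBlackNums = [2,4,6,8,10,11,13,15,17,20,22,24,26,29,31,33,35]
--     for numberInListBlack in listOfBlackNums:
--         if numberBeingTested == numberInListBlack: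
--             return  "black"
-- ===== SOURCE B (Python) =====
-- def whatColor(numberBeingTested):
--     # Closed-form wheel rule: 0/37 green; for 1..36 the color follows parity,
--     # flipped in the bands 11..18 and 29..36 (odd is red in 1..10 and 19..28,
--     # black in the other two bands).
--     if numberBeingTested == 0 or numberBeingTested == 37:
--         return "green"
--     if 1 <= numberBeingTested <= 36:
--         lowBand = numberBeingTested <= 10 or 19 <= numberBeingTested <= 28
--         if (numberBeingTested % 2 == 1) == lowBand:
--             return "red"
--         return "black"
--     return None
-- ===== Notes on version B (the rewrite author's own statement) =====
-- stated objective: alternative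
-- what changed: Replaces the two hard-coded list scans with the arithmetic roulette rule: green for 0/37, otherwise color determined by parity flipped in the bands 11-18 and 29-36, with no number lists at all.
-- intended difference: On input 28 A returns 'red' because its hard-coded red list wrongly contains 28, while B returns 'black', the actual color of 28 on a standard roulette wheel. — e.g. on whatColor(28): A returns some "red", B returns some "black"
import Mathlib
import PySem

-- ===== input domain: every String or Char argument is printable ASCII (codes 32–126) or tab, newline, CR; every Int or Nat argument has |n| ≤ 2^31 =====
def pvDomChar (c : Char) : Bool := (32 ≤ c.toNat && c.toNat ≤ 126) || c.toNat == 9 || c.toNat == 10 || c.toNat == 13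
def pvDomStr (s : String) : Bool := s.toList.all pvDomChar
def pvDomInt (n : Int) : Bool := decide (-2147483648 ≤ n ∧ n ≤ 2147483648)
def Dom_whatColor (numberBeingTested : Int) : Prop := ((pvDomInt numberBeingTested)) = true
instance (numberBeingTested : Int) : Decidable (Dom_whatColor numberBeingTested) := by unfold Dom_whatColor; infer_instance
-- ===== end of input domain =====

-- B replaces A's hard-coded list scans by the arithmetic roulette rule (parity,
-- flipped in the bands 11..18 and 29..36); on 28 B returns the intended 'black'
-- where A's mistaken red list returns 'red'.

-- ===== PORT A =====
-- 'for x in xs: if n == x: return c' — scan returning c on first match, none otherwise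
def scanColor (xs : List Int) (n : Int) (c : String) : Option String :=
  match xs with
  | [] => none
  | x :: rest => if n == x then some c else scanColor rest n c

def whatColor (numberBeingTested : Int) : Option String :=
  if numberBeingTested == 37 || numberBeingTested == 0 then some "green"
  else
    let listOfRedNums : List Int := [1,3,5,7,9,12,14,16,18,19,21,23,25,27,28,30,32,34,36]
    match scanColor listOfRedNums numberBeingTested "red" with
    | some s => some s
    | none =>
      let listOfBlackNums : List Int := [2,4,6,8,10,11,13,15,17,20,22,24,26,29,31,33,35]
      scanColor listOfBlackNums numberBeingTested "black"

-- ===== PORT B =====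
def whatColor_alt (numberBeingTested : Int) : Option String :=
  if numberBeingTested == 0 || numberBeingTested == 37 then some "green"
  else if 1 ≤ numberBeingTested ∧ numberBeingTested ≤ 36 then
    let lowBand : Bool :=
      decide (numberBeingTested ≤ 10 ∨ (19 ≤ numberBeingTested ∧ numberBeingTested ≤ 28))
    if (PySem.Int.mod numberBeingTested 2 == 1) == lowBand then some "red"
    else some "black"
  else none

-- ===== PRECONDITION & SPEC =====
-- On 28 A returns "red" (its red list wrongly contains 28) while B returns
-- "black", the actual color of 28 on a standard roulette wheel.
def D_whatColor (numberBeingTested : Int) : Prop := numberBeingTested = 28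
instance (numberBeingTested : Int) : Decidable (D_whatColor numberBeingTested) := by
  unfold D_whatColor; infer_instance

def Spec_whatColor (numberBeingTested : Int) (out : Option String) : Prop :=
  ¬ D_whatColor numberBeingTested → out = whatColor_alt numberBeingTested
instance (numberBeingTested : Int) (out : Option String) : Decidable (Spec_whatColor numberBeingTested out) := by
  unfold Spec_whatColor; infer_instance

def pvDiffWitness_whatColor : Int := 28
def pvDiffWitnessOut_whatColor : (Option String) × (Option String) := (some "red", some "black")

-- ===== CLAIM (what is proved, stated in full; the proofs are below) =====
def Claim_unchanged_whatColor : Prop :=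
  ∀ (numberBeingTested : Int), Dom_whatColor numberBeingTested →
    Spec_whatColor numberBeingTested (whatColor numberBeingTested)
def Claim_changed_whatColor : Prop :=
  Dom_whatColor (pvDiffWitness_whatColor) ∧ D_whatColor (pvDiffWitness_whatColor) ∧
  whatColor (pvDiffWitness_whatColor) = pvDiffWitnessOut_whatColor.1 ∧
  whatColor_alt (pvDiffWitness_whatColor) = pvDiffWitnessOut_whatColor.2 ∧
  pvDiffWitnessOut_whatColor.1 ≠ pvDiffWitnessOut_whatColor.2
def Claim_exact_whatColor : Prop :=
  ∀ (numberBeingTested : Int), Dom_whatColor numberBeingTested →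
    D_whatColor numberBeingTested → whatColor numberBeingTested ≠ whatColor_alt numberBeingTested

-- ===== LEMMAS AND PROOFS =====
set_option maxRecDepth 8000

theorem scanColor_of_not_mem (xs : List Int) (n : Int) (c : String) (h : n ∉ xs) :
    scanColor xs n c = none := by
  induction xs with
  | nil => rfl
  | cons x rest ih =>
    simp only [scanColor]
    rw [if_neg (by simp_all), ih (by simp_all)]

theorem whatColor_out_of_range (n : Int) (h : n < 0 ∨ 37 < n) :
    whatColor n = none ∧ whatColor_alt n = none := by
  constructor
  · simp only [whatColor]
    rw [if_neg (by simp; omega),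
        scanColor_of_not_mem _ _ _ (by simp; omega),
        scanColor_of_not_mem _ _ _ (by simp; omega)]
  · simp only [whatColor_alt]
    rw [if_neg (by simp; omega), if_neg (by omega)]

-- ===== VERDICT (by name: the statements are the Claim_ definitions above) =====
theorem whatColor_spec : Claim_unchanged_whatColor := by
  intro n _ hnd
  unfold D_whatColor at hnd
  by_cases h : 0 ≤ n ∧ n ≤ 37
  · obtain ⟨h1, h2⟩ := h
    interval_cases n <;> first | decide | exact absurd rfl hnd
  · obtain ⟨ha, hb⟩ := whatColor_out_of_range n (by omega)
    rw [ha, hb]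

theorem whatColor_changed : Claim_changed_whatColor := by
  unfold Claim_changed_whatColor; decide

theorem whatColor_tight : Claim_exact_whatColor := by
  intro n _ hd
  unfold D_whatColor at hd
  subst hd
  decide
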